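-- pv_equiv track=rewrite | github.com/weim1643/CCC | 2017/junior_data/j2/solution.py | solution
-- ===== SOURCE A (Python) =====
-- def solution(number):
--     n = int(number[0])
--     k = int(number[1])
--     sum = n
--     for i in range(int(number[1])):
--         num = n * (10 ** k)
--         sum += num
--         k -= 1
--
--     return str(sum)
-- ===== SOURCE B (Python) =====
-- def solution(number):
--     n = int(number[0])
--     k = int(number[1])
--
--     def rep(j):
--         # Horner-style: rep(j) is n repeated as a digit-block j+1 times
--         return n if j <= 0 else 10 * rep(j - 1) + n
--
--     return str(rep(k))
-- ===== Notes on version B (the rewrite author's own statement) =====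
-- stated objective: simpler
-- what changed: Replaces A's loop that accumulates n*10**k with a decreasing exponent by a Horner-style recursion rep(j) = 10*rep(j-1) + n, which appends the block n one step at a time; no exponentiation and no mutable loop state.
import Mathlib
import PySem

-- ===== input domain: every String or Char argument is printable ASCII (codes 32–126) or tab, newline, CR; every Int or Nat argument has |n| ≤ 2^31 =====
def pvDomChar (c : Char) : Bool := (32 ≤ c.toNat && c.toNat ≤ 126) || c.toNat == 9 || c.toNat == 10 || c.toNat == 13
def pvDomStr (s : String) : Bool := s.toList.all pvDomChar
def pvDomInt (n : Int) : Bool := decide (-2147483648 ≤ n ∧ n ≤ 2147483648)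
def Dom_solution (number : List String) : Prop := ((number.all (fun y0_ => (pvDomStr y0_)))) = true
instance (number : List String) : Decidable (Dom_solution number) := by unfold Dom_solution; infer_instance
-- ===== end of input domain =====

-- B replaces A's exponentiation loop by a Horner-style recursion rep(j) = 10*rep(j-1) + n (simpler, no 10**k).

-- ===== PORT A =====
-- literal transliteration: n = int(number[0]); k = int(number[1]); sum = n;
-- for i in range(int(number[1])): num = n*(10**k); sum += num; k -= 1; return str(sum)
-- (the loop state is (sum, k); 10**k with k ≥ 1 inside the loop is the Int power)
def solution (number : List String) : String :=
  match PySem.List.pyGet? number 0 with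
  | none => ""
  | some s0 =>
    match PySem.Int.ofStr? s0 with
    | none => ""
    | some n =>
      match PySem.List.pyGet? number 1 with
      | none => ""
      | some s1 =>
        match PySem.Int.ofStr? s1 with
        | none => ""
        | some k0 =>
          let st := (PySem.List.pyRange 0 k0 1).foldl
            (fun (st : Int × Int) _ => (st.1 + n * (10:Int) ^ st.2.toNat, st.2 - 1)) (n, k0)
          PySem.Int.toStr st.1

-- ===== PORT B =====
-- rep(j) = n if j <= 0 else 10*rep(j-1) + n; recursion on j done via j.toNat
-- (exact: for j ≤ 0 both give the base case n)
def pvRepAux (n : Int) : Nat → Int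
  | 0 => n
  | j+1 => 10 * pvRepAux n j + n

def pvRep (n j : Int) : Int := pvRepAux n j.toNat

def solution_alt (number : List String) : String :=
  (((PySem.List.pyGet? number 0).bind PySem.Int.ofStr?).bind fun n =>
    ((PySem.List.pyGet? number 1).bind PySem.Int.ofStr?).map fun k =>
      PySem.Int.toStr (pvRep n k)).getD ""

-- ===== PRECONDITION & SPEC =====
-- Pre_ excludes exactly the inputs on which A raises (IndexError: fewer than two
-- elements, or ValueError: number[0]/number[1] not parseable by int()); B raises there too.
def Pre_solution (number : List String) : Prop :=
  ((PySem.List.pyGet? number 0).bind PySem.Int.ofStr?).isSome = true ∧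
  ((PySem.List.pyGet? number 1).bind PySem.Int.ofStr?).isSome = true
instance (number : List String) : Decidable (Pre_solution number) := by
  unfold Pre_solution; infer_instance
def pvWitness_solution : List String := ["3", "4"]

def Spec_solution (number : List String) (out : String) : Prop := out = solution_alt number
instance (number : List String) (out : String) : Decidable (Spec_solution number out) := by
  unfold Spec_solution; infer_instance

-- ===== CLAIM (what is proved, stated in full; the proofs are below) =====
def Claim_equal_solution : Prop := ∀ (number : List String), Dom_solution number → Pre_solution number → Spec_solution number (solution number)

-- ===== LEMMAS AND PROOFS =====

-- A's loop abstracted: only the number of iterations matters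
def pvIter (n : Int) : Nat → Int × Int → Int × Int
  | 0, st => st
  | m+1, st => pvIter n m (st.1 + n * (10:Int) ^ st.2.toNat, st.2 - 1)

theorem pvFold_eq_iter (n : Int) (l : List Int) (st : Int × Int) :
    l.foldl (fun (st : Int × Int) _ => (st.1 + n * (10:Int) ^ st.2.toNat, st.2 - 1)) st
      = pvIter n l.length st := by
  induction l generalizing st with
  | nil => rfl
  | cons a l ih => simp [pvIter, ih]

-- G m = 10^1 + 10^2 + … + 10^m
def pvG : Nat → Int
  | 0 => 0
  | m+1 => (10:Int) ^ (m+1) + pvG m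

theorem pvIter_val (n : Int) (m : Nat) (s : Int) :
    pvIter n m (s, (m : Int)) = (s + n * pvG m, 0) := by
  induction m generalizing s with
  | zero => simp [pvIter, pvG]
  | succ m ih =>
    have h1 : ((m + 1 : Nat) : Int).toNat = m + 1 := by omega
    have h2 : ((m + 1 : Nat) : Int) - 1 = (m : Int) := by push_cast; ring
    show pvIter n m (s + n * (10:Int) ^ ((m + 1 : Nat) : Int).toNat, ((m + 1 : Nat) : Int) - 1)
        = (s + n * pvG (m + 1), 0)
    rw [h1, h2, ih]
    simp [pvG]; ring

theorem pvG_nine (m : Nat) : 9 * pvG m = (10:Int) ^ (m+1) - 10 := by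
  induction m with
  | zero => simp [pvG]
  | succ m ih =>
    simp only [pvG]
    have h : (10:Int) ^ (m+1+1) = 10 * (10:Int) ^ (m+1) := by ring
    linarith

theorem pvRepAux_val (n : Int) (m : Nat) : pvRepAux n m = n + n * pvG m := by
  induction m with
  | zero => simp [pvRepAux, pvG]
  | succ m ih =>
    simp only [pvRepAux, pvG]
    rw [ih]
    linear_combination n * pvG_nine m

theorem pv_key (n k0 : Int) :
    ((PySem.List.pyRange 0 k0 1).foldl
        (fun (st : Int × Int) _ => (st.1 + n * (10:Int) ^ st.2.toNat, st.2 - 1)) (n, k0)).1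
      = pvRep n k0 := by
  rw [pvFold_eq_iter]
  have hlen : (PySem.List.pyRange 0 k0 1).length = (k0 - 0).toNat := by
    rw [PySem.List.pyRange_one]; simp
  rw [hlen]
  by_cases hk : k0 < 0
  · have h0 : (k0 - 0).toNat = 0 := by omega
    have h0' : k0.toNat = 0 := by omega
    rw [h0]
    simp [pvIter, pvRep, h0', pvRepAux]
  · have hk0 : k0 = (k0.toNat : Int) := by omega
    have hms : (k0 - 0).toNat = k0.toNat := by omega
    rw [hms, show (n, k0) = (n, (k0.toNat : Int)) from by rw [← hk0], pvIter_val]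
    simp [pvRep, pvRepAux_val]

-- ===== VERDICT (by name: the statement is the Claim_ definition above) =====
theorem solution_spec : Claim_equal_solution := by
  intro number _ hpre
  obtain ⟨h0, h1⟩ := hpre
  unfold Spec_solution solution solution_alt
  cases hg0 : PySem.List.pyGet? number 0 with
  | none => rw [hg0] at h0; simp at h0
  | some s0 =>
    cases hn : PySem.Int.ofStr? s0 with
    | none => rw [hg0] at h0; simp at h0; simp [hn] at h0
    | some n =>
      cases hg1 : PySem.List.pyGet? number 1 with
      | none => rw [hg1] at h1; simp at h1
      | some s1 =>
        cases hk : PySem.Int.ofStr? s1 with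
        | none => rw [hg1] at h1; simp at h1; simp [hk] at h1
        | some k0 =>
          simp only [hn, hk, Option.bind_some, Option.map_some, Option.getD_some]
          rw [pv_key n k0]
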